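-- pv_equiv track=rewrite | github.com/a1cnore/HackedGlory | mitm/vg_dns.py | should_spoof
-- ===== SOURCE A (Python) =====
-- SPOOF_DOMAINS = {
--     "platform.superevil.net",
--     "platform.superevilmegacorp.net",
--     "preauth.superevil.net",
--     "rpc.kindred-live.net",
--     "gamefeeds.superevilmegacorp.net",
-- }
--
-- def should_spoof(name: str) -> bool:
--     name = name.rstrip(".")
--     if name in SPOOF_DOMAINS:
--         return True
--     # Also match subdomains
--     for domain in SPOOF_DOMAINS:
--         if name.endswith("." + domain):
--             return True
--     return False
-- ===== SOURCE B (Python) =====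
-- SPOOF_DOMAINS = {
--     "platform.superevil.net",
--     "platform.superevilmegacorp.net",
--     "preauth.superevil.net",
--     "rpc.kindred-live.net",
--     "gamefeeds.superevilmegacorp.net",
-- }
--
--
-- def should_spoof(name: str) -> bool:
--     # One pass over the name's characters: every '.' opens a dot-boundary
--     # suffix; look each suffix up in the set instead of scanning every
--     # domain with endswith.
--     name = name.rstrip(".")
--     if name in SPOOF_DOMAINS:
--         return True
--     return any(ch == "." and name[i + 1:] in SPOOF_DOMAINS
--                for i, ch in enumerate(name))
-- ===== Notes on version B (the rewrite author's own statement) =====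
-- stated objective: alternative
-- what changed: Instead of looping over every SPOOF_DOMAIN and testing it as a dotted suffix with endswith, B makes one pass over the name's characters and looks up the suffix after each dot directly in the set.
import Mathlib
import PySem

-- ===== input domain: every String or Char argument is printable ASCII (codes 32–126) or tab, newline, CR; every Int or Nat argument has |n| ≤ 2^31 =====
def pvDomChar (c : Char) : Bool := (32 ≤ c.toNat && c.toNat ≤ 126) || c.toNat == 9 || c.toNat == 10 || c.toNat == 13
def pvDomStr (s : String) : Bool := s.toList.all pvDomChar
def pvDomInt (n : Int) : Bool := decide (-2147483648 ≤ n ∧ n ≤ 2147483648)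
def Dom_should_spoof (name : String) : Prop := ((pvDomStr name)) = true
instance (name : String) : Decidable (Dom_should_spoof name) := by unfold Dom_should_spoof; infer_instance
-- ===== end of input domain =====

-- B replaces A's scan over every SPOOF_DOMAIN with endswith by one pass over the
-- name's characters, looking up the suffix after each '.' in the set (alternative).


-- ===== PORT A =====
-- the module constant SPOOF_DOMAINS (a Python set of distinct string literals)
def pvSpoofDomains : List (List Char) :=
  [ "platform.superevil.net".toList,
    "platform.superevilmegacorp.net".toList,
    "preauth.superevil.net".toList,
    "rpc.kindred-live.net".toList,
    "gamefeeds.superevilmegacorp.net".toList ]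

-- name.rstrip("."): drop trailing '.' characters (exact hand port of rstrip with a char argument)
def pvRstripDots (cs : List Char) : List Char :=
  (cs.reverse.dropWhile (fun c => c == '.')).reverse

def should_spoof (name : String) : Bool :=
  let n := pvRstripDots name.toList
  if pvSpoofDomains.contains n then true
  else pvSpoofDomains.any (fun d => PySem.Chars.endswith n ('.' :: d))

-- ===== PORT B =====
def should_spoof_alt (name : String) : Bool :=
  let n := pvRstripDots name.toList
  if pvSpoofDomains.contains n then true
  else (PySem.List.enumerate n).any (fun p =>
    p.2 == '.' && pvSpoofDomains.contains (PySem.Chars.slice n (some (p.1 + 1)) none))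

-- ===== PRECONDITION & SPEC =====
def Spec_should_spoof (name : String) (out : Bool) : Prop := out = should_spoof_alt name
instance (name : String) (out : Bool) : Decidable (Spec_should_spoof name out) := by unfold Spec_should_spoof; infer_instance

-- ===== CLAIM (what is proved, stated in full; the proofs are below) =====
def Claim_equal_should_spoof : Prop := ∀ (name : String), Dom_should_spoof name → Spec_should_spoof name (should_spoof name)

-- ===== LEMMAS AND PROOFS =====

-- the core equivalence: "some domain d with '.'++d a suffix of n" = "some position i
-- with n[i] = '.' whose tail n[i+1:] is a domain", for any n and any domain list
theorem pv_any_endswith_eq (n : List Char) (L : List (List Char)) :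
    L.any (fun d => PySem.Chars.endswith n ('.' :: d)) =
    (PySem.List.enumerate n).any (fun p =>
      p.2 == '.' && L.contains (PySem.Chars.slice n (some (p.1 + 1)) none)) := by
  rw [Bool.eq_iff_iff]
  simp only [List.any_eq_true, PySem.Chars.endswith_iff, Bool.and_eq_true, beq_iff_eq,
    List.contains_eq_mem, decide_eq_true_eq, PySem.Chars.slice_eq_listSlice,
    PySem.List.mem_enumerate_iff]
  constructor
  · rintro ⟨d, hd, u, hu⟩
    subst hu
    have hlen : u.length < (u ++ '.' :: d).length := by simp
    refine ⟨(↑u.length, (u ++ '.' :: d)[u.length]), ⟨u.length, hlen, by simp⟩, ?_, ?_⟩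
    · show (u ++ '.' :: d)[u.length] = '.'
      simp
    · show PySem.List.slice (u ++ '.' :: d) (some ((u.length : Int) + 1)) ∈ L
      rw [PySem.List.slice_from (ha := by omega)]
      have ht : ((u.length : Int) + 1).toNat = u.length + 1 := by omega
      rw [ht]
      have : u ++ '.' :: d = (u ++ ['.']) ++ d := by simp
      rw [this, List.drop_left' (by simp : (u ++ ['.']).length = u.length + 1)]
      exact hd
  · rintro ⟨p, ⟨k, hk, rfl⟩, hdot, hmem⟩
    simp only at hdot hmem
    rw [PySem.List.slice_from (ha := by omega)] at hmem
    have ht : ((0 : Int) + (k:Int) + 1).toNat = k + 1 := by omega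
    rw [ht] at hmem
    refine ⟨n.drop (k+1), hmem, ?_⟩
    have h2 := List.drop_eq_getElem_cons (l := n) hk
    rw [hdot] at h2
    rw [← h2]
    exact ⟨n.take k, by simp⟩

-- ===== VERDICT (by name: the statement is the Claim_ definition above) =====
theorem should_spoof_spec : Claim_equal_should_spoof := by
  intro name _
  unfold Spec_should_spoof should_spoof should_spoof_alt
  simp only []
  rw [pv_any_endswith_eq]
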